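-- pv_equiv track=rewrite | github.com/TalBl/CausalExplanationforDisparity | bypass_edges.py | remove_vertices_and_bypass
-- ===== SOURCE A (Python) =====
-- from collections import defaultdict
--
-- def remove_vertices_and_bypass(edges, vertices_to_remove):
--     """Remove edges involving specific vertices and create bypassing edges."""
--     adjacency_list = defaultdict(list)
--     for source, target in edges:
--         adjacency_list[source].append(target)
--
--     new_edges = []  # Store the bypassing edges
--
--     for vertex in vertices_to_remove:
--         # Identify all sources and targets for the current vertex
--         sources = [src for src, targets in adjacency_list.items() if vertex in targets]
--         targets = adjacency_list.get(vertex, [])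
--
--         # Create bypassing edges
--         for src in sources:
--             for tgt in targets:
--                 if tgt not in vertices_to_remove:  # Only create valid bypassing edges
--                     new_edges.append((src, tgt))
--
--         # Remove all references to the current vertex in the adjacency list
--         for src in sources:
--             adjacency_list[src].remove(vertex)
--         if vertex in adjacency_list:
--             del adjacency_list[vertex]
--
--     # Combine the original edges with the bypassing edges
--     # and exclude any edges that were removed
--     updated_edges = [
--         (src, tgt) for src, tgt in edges
--         if src not in vertices_to_remove and tgt not in vertices_to_remove
--     ]
--     updated_edges.extend(new_edges)
--
--     return updated_edges
-- ===== SOURCE B (Python) =====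
-- def remove_vertices_and_bypass(edges, vertices_to_remove):
--     """Remove edges involving specific vertices and create bypassing edges.
--
--     Faster variant: maintains a reverse-adjacency (predecessor) index so the
--     sources of each removed vertex are found by direct lookup instead of
--     scanning the whole adjacency list per removed vertex."""
--     rm = set(vertices_to_remove)
--
--     succ = {}  # source -> list of targets (current, with multiplicity)
--     for s, t in edges:
--         succ.setdefault(s, []).append(t)
--
--     # pred[t] = ordered set (dict keys) of live sources s with t in succ[s];
--     # built by iterating succ in key order, so each pred[t] is ordered by the
--     # sources' first-appearance order, and stays so (we only ever delete).
--     pred = {}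
--     for s, ts in succ.items():
--         for t in ts:
--             pred.setdefault(t, {})[s] = None
--
--     new_edges = []
--     for v in vertices_to_remove:
--         sources = list(pred.get(v, ()))
--         targets = succ.get(v, [])
--         new_edges.extend((s, t) for s in sources for t in targets
--                          if t not in rm)
--         for s in sources:
--             lst = succ[s]
--             lst.remove(v)
--             if v not in lst:
--                 del pred[v][s]
--         if v in succ:
--             for t in succ[v]:
--                 pred[t].pop(v, None)
--             del succ[v]
--
--     result = [(s, t) for s, t in edges if s not in rm and t not in rm]
--     result.extend(new_edges)
--     return result
-- ===== Notes on version B (the rewrite author's own statement) =====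
-- stated objective: faster
-- what changed: B precomputes and maintains a reverse-adjacency (predecessor) index keyed by target, so the sources of each removed vertex are found by direct lookup instead of A's scan over the whole adjacency dict per removed vertex.
import Mathlib
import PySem

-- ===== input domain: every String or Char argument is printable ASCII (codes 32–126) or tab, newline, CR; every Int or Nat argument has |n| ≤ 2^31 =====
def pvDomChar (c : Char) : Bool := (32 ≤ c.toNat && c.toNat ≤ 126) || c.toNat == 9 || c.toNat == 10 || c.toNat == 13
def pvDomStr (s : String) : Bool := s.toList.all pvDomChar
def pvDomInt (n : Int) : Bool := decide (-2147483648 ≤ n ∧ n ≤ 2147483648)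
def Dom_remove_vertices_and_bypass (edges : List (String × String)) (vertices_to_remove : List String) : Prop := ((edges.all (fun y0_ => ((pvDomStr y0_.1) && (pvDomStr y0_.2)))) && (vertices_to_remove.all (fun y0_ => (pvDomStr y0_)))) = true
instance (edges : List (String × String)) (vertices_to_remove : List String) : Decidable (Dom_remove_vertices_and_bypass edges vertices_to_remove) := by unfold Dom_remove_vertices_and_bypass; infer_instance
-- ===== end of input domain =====

-- B replaces A's per-removed-vertex scan of the whole adjacency dict by a maintained
-- reverse-adjacency (predecessor) index, looked up directly (objective: faster).


-- ===== PORT A =====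
-- sources = [src for src, targets in adjacency_list.items() if vertex in targets]
def pvSourcesA (adj : PySem.Dict String (List String)) (v : String) : List String :=
  (adj.items.filter (fun p => decide (v ∈ p.2))).map (fun p => p.1)

-- one iteration of A's 'for vertex in vertices_to_remove' loop (state: adjacency dict, new_edges)
def pvStepA (vtr : List String) (st : PySem.Dict String (List String) × List (String × String))
    (v : String) : PySem.Dict String (List String) × List (String × String) :=
  let sources := pvSourcesA st.1 v
  let targets := st.1.getD v []
  let ne := sources.foldl (fun acc s =>
    targets.foldl (fun acc t => if t ∈ vtr then acc else acc ++ [(s, t)]) acc) st.2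
  -- adjacency_list[src].remove(vertex): src ∈ sources has v in its list, so .remove never raises
  -- (the getD fallback of remove? is unreachable)
  let adj := sources.foldl (fun a s => a.modify s [] (fun l => (PySem.List.remove? l v).getD l)) st.1
  let adj := if adj.contains v then adj.erase v else adj
  (adj, ne)

def remove_vertices_and_bypass (edges : List (String × String)) (vertices_to_remove : List String) :
    List (String × String) :=
  let adj0 : PySem.Dict String (List String) :=
    edges.foldl (fun d p => d.modify p.1 [] (fun l => l ++ [p.2])) PySem.Dict.empty
  let st := vertices_to_remove.foldl (pvStepA vertices_to_remove) (adj0, [])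
  (edges.filter (fun p =>
    decide (p.1 ∉ vertices_to_remove) && decide (p.2 ∉ vertices_to_remove))) ++ st.2

-- ===== PORT B =====
-- one iteration of B's loop (state: succ dict, pred index, new_edges); rm = set(vertices_to_remove)
def pvStepB (rm : PySem.Set String)
    (st : PySem.Dict String (List String) × PySem.Dict String (PySem.Dict String Unit) × List (String × String))
    (v : String) :
    PySem.Dict String (List String) × PySem.Dict String (PySem.Dict String Unit) × List (String × String) :=
  let sources := (st.2.1.getD v PySem.Dict.empty).keys
  let targets := st.1.getD v []
  let ne := st.2.2 ++ sources.flatMap (fun s =>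
    (targets.filter (fun t => !(rm.contains t))).map (fun t => (s, t)))
  let sp := sources.foldl
    (fun (sp : PySem.Dict String (List String) × PySem.Dict String (PySem.Dict String Unit)) s =>
      -- lst = succ[s]; lst.remove(v): s is a key and v ∈ succ[s], so neither raises
      let lst := (PySem.List.remove? (sp.1.getD s []) v).getD (sp.1.getD s [])
      -- if v not in lst: del pred[v][s]
      let pr := if v ∈ lst then sp.2 else sp.2.modify v PySem.Dict.empty (fun d => d.erase s)
      (sp.1.insert s lst, pr)) (st.1, st.2.1)
  if sp.1.contains v then
    -- for t in succ[v]: pred[t].pop(v, None)  (t is always a pred key, so modify never creates one)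
    let pr := (sp.1.getD v []).foldl
      (fun pr t => pr.modify t PySem.Dict.empty (fun d => d.erase v)) sp.2
    (sp.1.erase v, pr, ne)
  else (sp.1, sp.2, ne)

def remove_vertices_and_bypass_alt (edges : List (String × String)) (vertices_to_remove : List String) :
    List (String × String) :=
  let rm : PySem.Set String := PySem.Set.ofList vertices_to_remove
  let succ0 : PySem.Dict String (List String) :=
    edges.foldl (fun d p => d.modify p.1 [] (fun l => l ++ [p.2])) PySem.Dict.empty
  -- pred[t] = ordered set of sources s with t in succ[s] (pred.setdefault(t, {})[s] = None)
  let pred0 : PySem.Dict String (PySem.Dict String Unit) :=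
    succ0.items.foldl (fun pr q =>
      q.2.foldl (fun pr t => pr.modify t PySem.Dict.empty (fun d => d.insert q.1 ())) pr)
      PySem.Dict.empty
  let st := vertices_to_remove.foldl (pvStepB rm) (succ0, pred0, [])
  (edges.filter (fun p => !(rm.contains p.1) && !(rm.contains p.2))) ++ st.2.2

-- ===== PRECONDITION & SPEC =====
def Spec_remove_vertices_and_bypass (edges : List (String × String)) (vertices_to_remove : List String) (out : List (String × String)) : Prop := out = remove_vertices_and_bypass_alt edges vertices_to_remove
instance (edges : List (String × String)) (vertices_to_remove : List String) (out : List (String × String)) : Decidable (Spec_remove_vertices_and_bypass edges vertices_to_remove out) := by unfold Spec_remove_vertices_and_bypass; infer_instance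

-- ===== CLAIM (what is proved, stated in full; the proofs are below) =====
def Claim_equal_remove_vertices_and_bypass : Prop := ∀ (edges : List (String × String)) (vertices_to_remove : List String), Dom_remove_vertices_and_bypass edges vertices_to_remove → Spec_remove_vertices_and_bypass edges vertices_to_remove (remove_vertices_and_bypass edges vertices_to_remove)

-- ===== LEMMAS AND PROOFS =====

-- keys of a predecessor entry
def pvPredK (pred : PySem.Dict String (PySem.Dict String Unit)) (t : String) : List String :=
  (pred.getD t PySem.Dict.empty).keys

-- the simulation invariant: adjacency keys are distinct and pred indexes exactly the sources
def pvInv (adj : PySem.Dict String (List String))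
    (pred : PySem.Dict String (PySem.Dict String Unit)) : Prop :=
  adj.keys.Nodup ∧
  ∀ t, pvPredK pred t = adj.keys.filter (fun s => decide (t ∈ adj.getD s []))

-- Dict.erase on the get?/getD/keys level
lemma pv_get?_erase {κ ν : Type} [BEq κ] [LawfulBEq κ] [DecidableEq κ] (d : PySem.Dict κ ν) (k x : κ) :
    (d.erase k).get? x = if x = k then none else d.get? x := by
  rcases d with ⟨its⟩
  simp only [PySem.Dict.erase, PySem.Dict.get?]
  by_cases hxk : x = k
  · subst hxk
    have : (its.filter (fun p => !(p.1 == x))).find? (fun p => p.1 == x) = none := by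
      apply List.find?_eq_none.mpr
      intro p hp
      have := (List.mem_filter.mp hp).2
      simpa using this
    simp [this]
  · simp only [if_neg hxk]
    congr 1
    induction its with
    | nil => rfl
    | cons p rest ih =>
      by_cases hk : p.1 = k
      · rw [List.filter_cons, if_neg (by simp [hk]),
          List.find?_cons_of_neg (p := fun q : κ × ν => q.1 == x) (by simp [hk]; exact fun h => hxk h.symm),
          ih]
      · rw [List.filter_cons, if_pos (by simp [hk])]
        by_cases hpx : (p.1 == x) = true
        · rw [List.find?_cons_of_pos (p := fun q : κ × ν => q.1 == x) hpx,
            List.find?_cons_of_pos (p := fun q : κ × ν => q.1 == x) hpx]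
        · rw [List.find?_cons_of_neg (p := fun q : κ × ν => q.1 == x) (by simpa using hpx),
            List.find?_cons_of_neg (p := fun q : κ × ν => q.1 == x) (by simpa using hpx), ih]

lemma pv_getD_erase {κ ν : Type} [BEq κ] [LawfulBEq κ] [DecidableEq κ] (d : PySem.Dict κ ν) (k x : κ) (d0 : ν) :
    (d.erase k).getD x d0 = if x = k then d0 else d.getD x d0 := by
  simp only [PySem.Dict.getD_eq_get?_getD, pv_get?_erase]
  by_cases h : x = k <;> simp [h]

lemma pv_keys_erase {κ ν : Type} [BEq κ] (d : PySem.Dict κ ν) (k : κ) :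
    (d.erase k).keys = d.keys.filter (fun x => !(x == k)) := by
  rcases d with ⟨its⟩
  simp only [PySem.Dict.erase, PySem.Dict.keys]
  rw [show (fun p : κ × ν => !(p.1 == k)) = (fun x => !(x == k)) ∘ (fun p : κ × ν => p.1) from rfl,
    ← List.filter_map]

-- A's sources as a filter over the key list
lemma pv_sourcesA_eq (adj : PySem.Dict String (List String)) (v : String) (h : adj.keys.Nodup) :
    pvSourcesA adj v = adj.keys.filter (fun s => decide (v ∈ adj.getD s [])) := by
  unfold pvSourcesA
  rw [PySem.Dict.items_eq_map_keys adj h ([] : List String), List.filter_map, List.map_map]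
  simp only [Function.comp_def]
  exact List.map_id _

-- building pred0, inner loop: for t in ts: pred[t] gets s inserted (once)
lemma pv_build_inner (ts : List String) (s : String)
    (pr : PySem.Dict String (PySem.Dict String Unit)) (t : String) :
    ((ts.foldl (fun pr t => pr.modify t PySem.Dict.empty (fun d => d.insert s ())) pr).getD t
        PySem.Dict.empty) =
      if t ∈ ts then (pr.getD t PySem.Dict.empty).insert s () else pr.getD t PySem.Dict.empty := by
  induction ts generalizing pr with
  | nil => simp
  | cons t0 rest ih =>
    simp only [List.foldl_cons]
    rw [ih]
    by_cases h0 : t = t0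
    · subst h0
      rw [PySem.Dict.getD_modify_self]
      by_cases hr : t ∈ rest
      · rw [if_pos hr, if_pos (List.mem_cons_self ..), PySem.Dict.insert_insert_self]
      · rw [if_neg hr, if_pos (List.mem_cons_self ..)]
    · rw [PySem.Dict.getD_modify_of_ne _ _ _ h0]
      simp [h0]

-- building pred0, outer loop over items
lemma pv_build_outer (its : List (String × List String))
    (pr : PySem.Dict String (PySem.Dict String Unit)) (t : String) :
    ((its.foldl (fun pr q =>
        q.2.foldl (fun pr t => pr.modify t PySem.Dict.empty (fun d => d.insert q.1 ())) pr) pr).getD t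
          PySem.Dict.empty) =
      (its.filter (fun q => decide (t ∈ q.2))).foldl (fun d q => d.insert q.1 ()) (pr.getD t PySem.Dict.empty) := by
  induction its generalizing pr with
  | nil => simp
  | cons q rest ih =>
    simp only [List.foldl_cons, List.filter_cons]
    rw [ih, pv_build_inner]
    by_cases hq : t ∈ q.2
    · simp [hq]
    · simp [hq]

-- the grouping loop shared by both ports
def pvGroup (edges : List (String × String)) : PySem.Dict String (List String) :=
  edges.foldl (fun d p => d.modify p.1 [] (fun l => l ++ [p.2])) PySem.Dict.empty

lemma pv_inv_init (edges : List (String × String)) :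
    pvInv (pvGroup edges)
      ((pvGroup edges).items.foldl (fun pr q =>
        q.2.foldl (fun pr t => pr.modify t PySem.Dict.empty (fun d => d.insert q.1 ())) pr)
        PySem.Dict.empty) := by
  have hnd : (pvGroup edges).keys.Nodup :=
    PySem.Dict.nodup_keys_foldl_modify_key (l := edges) (key := fun p => p.1) (d0 := [])
      (f := fun _ p l => l ++ [p.2]) (d := PySem.Dict.empty) PySem.Dict.nodup_keys_empty
  refine ⟨hnd, fun t => ?_⟩
  unfold pvPredK
  rw [pv_build_outer, PySem.Dict.getD_empty,
    PySem.Dict.keys_foldl_insert_key (key := fun q : String × List String => q.1)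
      (f := fun _ _ => ())]
  have hsub : (((pvGroup edges).items.filter (fun q => decide (t ∈ q.2))).map
      (fun q => q.1)).Sublist (pvGroup edges).keys :=
    List.Sublist.map _ List.filter_sublist
  rw [show PySem.Set.update PySem.Dict.empty.keys
      (((pvGroup edges).items.filter (fun q => decide (t ∈ q.2))).map (fun q => q.1)) =
      PySem.Set.ofList
        (((pvGroup edges).items.filter (fun q => decide (t ∈ q.2))).map (fun q => q.1)) from rfl]
  rw [PySem.Set.ofList_eq_self_of_nodup _ (hnd.sublist hsub)]
  exact pv_sourcesA_eq _ t hnd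

-- fold of modify over distinct keys, getD level
lemma pv_modfold_getD (g : List String → List String) (S : List String)
    (cur : PySem.Dict String (List String)) (x : String) (h : S.Nodup) :
    (S.foldl (fun a s => a.modify s [] g) cur).getD x [] =
      if x ∈ S then g (cur.getD x []) else cur.getD x [] := by
  revert h
  induction S generalizing cur with
  | nil => intro _; simp
  | cons s0 rest ih =>
    intro h
    obtain ⟨h0, hrest⟩ := List.nodup_cons.mp h
    simp only [List.foldl_cons]
    rw [ih _ hrest]
    by_cases hx0 : x = s0
    · subst hx0
      rw [if_neg h0, PySem.Dict.getD_modify_self, if_pos (List.mem_cons_self ..)]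
    · rw [PySem.Dict.getD_modify_of_ne _ _ _ hx0]
      simp [hx0]

-- fold of modify over existing keys leaves the key list unchanged
lemma pv_modfold_keys (g : List String → List String) (S : List String)
    (cur : PySem.Dict String (List String)) (h : ∀ s ∈ S, s ∈ cur.keys) :
    (S.foldl (fun a s => a.modify s [] g) cur).keys = cur.keys := by
  revert h
  induction S generalizing cur with
  | nil => intro _; rfl
  | cons s0 rest ih =>
    intro h
    have hc : cur.contains s0 = true :=
      (PySem.Dict.contains_iff_mem_keys _ _).mpr (h s0 (List.mem_cons_self ..))
    have hk : (cur.modify s0 [] g).keys = cur.keys := by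
      rw [PySem.Dict.keys_modify, PySem.Dict.keys_insert_of_contains _ _ hc]
    simp only [List.foldl_cons]
    rw [ih _ (fun s hs => by rw [hk]; exact h s (List.mem_cons_of_mem _ hs)), hk]

-- decoupling B's paired update loop into its succ fold (= A's) and a pred fold
lemma pv_pair_fold (v : String) (adj : PySem.Dict String (List String)) (S : List String)
    (cur : PySem.Dict String (List String)) (pr : PySem.Dict String (PySem.Dict String Unit))
    (hnd : S.Nodup) (hagree : ∀ s ∈ S, cur.getD s [] = adj.getD s []) :
    S.foldl (fun sp s =>
        (sp.1.insert s ((PySem.List.remove? (sp.1.getD s []) v).getD (sp.1.getD s [])),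
         if v ∈ (PySem.List.remove? (sp.1.getD s []) v).getD (sp.1.getD s []) then sp.2
         else sp.2.modify v PySem.Dict.empty (fun d => d.erase s))) (cur, pr) =
      (S.foldl (fun a s => a.modify s [] (fun l => (PySem.List.remove? l v).getD l)) cur,
       S.foldl (fun pr s =>
         if v ∈ (PySem.List.remove? (adj.getD s []) v).getD (adj.getD s []) then pr
         else pr.modify v PySem.Dict.empty (fun d => d.erase s)) pr) := by
  revert hnd hagree
  induction S generalizing cur pr with
  | nil => intro _ _; rfl
  | cons s0 rest ih =>
    intro hnd hagree
    obtain ⟨h0, hrest⟩ := List.nodup_cons.mp hnd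
    have hs0 : cur.getD s0 [] = adj.getD s0 [] := hagree s0 (List.mem_cons_self ..)
    simp only [List.foldl_cons]
    rw [show (cur.modify s0 [] (fun l => (PySem.List.remove? l v).getD l)) =
      cur.insert s0 ((PySem.List.remove? (cur.getD s0 []) v).getD (cur.getD s0 [])) from rfl]
    rw [hs0]
    have hcur' : ∀ s ∈ rest,
        (cur.insert s0 ((PySem.List.remove? (adj.getD s0 []) v).getD (adj.getD s0 []))).getD s []
          = adj.getD s [] := by
      intro s hs
      have hne : s ≠ s0 := fun he => h0 (he ▸ hs)
      rw [PySem.Dict.getD_insert, if_neg hne]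
      exact hagree s (List.mem_cons_of_mem _ hs)
    exact ih _ _ hrest hcur'

-- the pred fold touches only the entry at v
lemma pv_predfold_getD (v : String) (c : String → Prop) [DecidablePred c] (S : List String)
    (pr : PySem.Dict String (PySem.Dict String Unit)) (t : String) :
    (S.foldl (fun pr s =>
        if c s then pr else pr.modify v PySem.Dict.empty (fun d => d.erase s)) pr).getD t
        PySem.Dict.empty =
      if t = v then
        S.foldl (fun d s => if c s then d else d.erase s) (pr.getD v PySem.Dict.empty)
      else pr.getD t PySem.Dict.empty := by
  induction S generalizing pr with
  | nil => by_cases ht : t = v <;> simp [ht]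
  | cons s0 rest ih =>
    simp only [List.foldl_cons]
    rw [ih]
    by_cases hc : c s0
    · rw [if_pos hc, if_pos hc]
    · rw [if_neg hc, if_neg hc]
      by_cases ht : t = v
      · subst ht; rw [if_pos rfl, if_pos rfl, PySem.Dict.getD_modify_self]
      · rw [if_neg ht, if_neg ht, PySem.Dict.getD_modify_of_ne _ _ _ ht]

-- keys after a fold of conditional erases
lemma pv_erasefold_keys (c : String → Prop) [DecidablePred c] (S : List String)
    (d0 : PySem.Dict String Unit) :
    (S.foldl (fun d s => if c s then d else d.erase s) d0).keys =
      d0.keys.filter (fun x => decide (x ∉ S ∨ c x)) := by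
  induction S generalizing d0 with
  | nil => simp
  | cons s0 rest ih =>
    simp only [List.foldl_cons]
    rw [ih]
    by_cases hc : c s0
    · rw [if_pos hc]
      apply List.filter_congr
      intro x _
      by_cases hx : x = s0
      · subst hx; simp [hc]
      · simp [hx]
    · rw [if_neg hc, pv_keys_erase, List.filter_filter]
      apply List.filter_congr
      intro x _
      by_cases hx : x = s0
      · subst hx; simp [hc]
      · simp [hx]

-- the del-branch fold: erase v from pred[t] for every t in ts
lemma pv_delfold_keys (v : String) (ts : List String)
    (pr : PySem.Dict String (PySem.Dict String Unit)) (t : String) :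
    ((ts.foldl (fun pr t => pr.modify t PySem.Dict.empty (fun d => d.erase v)) pr).getD t
        PySem.Dict.empty).keys =
      if t ∈ ts then ((pr.getD t PySem.Dict.empty).keys.filter (fun x => !(x == v)))
      else (pr.getD t PySem.Dict.empty).keys := by
  induction ts generalizing pr with
  | nil => simp
  | cons t0 rest ih =>
    simp only [List.foldl_cons]
    rw [ih]
    by_cases h0 : t = t0
    · subst h0
      rw [if_pos (List.mem_cons_self ..)]
      by_cases hr : t ∈ rest
      · rw [if_pos hr, PySem.Dict.getD_modify_self, pv_keys_erase, List.filter_filter]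
        apply List.filter_congr
        intro x _
        simp
      · rw [if_neg hr, PySem.Dict.getD_modify_self, pv_keys_erase]
    · rw [PySem.Dict.getD_modify_of_ne _ _ _ h0]
      by_cases hr : t ∈ rest
      · rw [if_pos hr, if_pos (List.mem_cons_of_mem _ hr)]
      · rw [if_neg hr, if_neg (by simp [h0, hr])]

-- set(vertices_to_remove) membership is list membership
lemma pv_contains_ofList (l : List String) (x : String) :
    (PySem.Set.ofList l).contains x = decide (x ∈ l) := by
  simp only [PySem.Set.contains, List.contains_eq_mem]
  by_cases h : x ∈ l <;> simp [PySem.Set.mem_ofList, h]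

-- the two bypass-edge accumulations agree
lemma pv_ne_eq (vtr : List String) (sources targets : List String) (ne : List (String × String)) :
    sources.foldl (fun acc s =>
        targets.foldl (fun acc t => if t ∈ vtr then acc else acc ++ [(s, t)]) acc) ne =
      ne ++ sources.flatMap (fun s =>
        (targets.filter (fun t => !((PySem.Set.ofList vtr).contains t))).map (fun t => (s, t))) := by
  have hinner : ∀ (s : String) (acc : List (String × String)),
      targets.foldl (fun acc t => if t ∈ vtr then acc else acc ++ [(s, t)]) acc
        = acc ++ (targets.filter (fun t => !((PySem.Set.ofList vtr).contains t))).map (fun t => (s, t)) := by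
    intro s acc
    rw [show (fun (acc : List (String × String)) t => if t ∈ vtr then acc else acc ++ [(s, t)])
        = fun acc t => if t ∉ vtr then acc ++ [(s, t)] else acc from by
      funext acc t; by_cases h : t ∈ vtr <;> simp [h]]
    rw [PySem.List.foldl_append_ite (p := fun t => t ∉ vtr) (f := fun t => (s, t))]
    congr 2
    apply List.filter_congr
    intro t _
    rw [pv_contains_ofList]
    by_cases h : t ∈ vtr <;> simp [h]
  rw [show (fun (acc : List (String × String)) s =>
        targets.foldl (fun acc t => if t ∈ vtr then acc else acc ++ [(s, t)]) acc)
      = fun acc s => acc ++ (targets.filter (fun t => !((PySem.Set.ofList vtr).contains t))).map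
          (fun t => (s, t)) from by funext acc s; exact hinner s acc]
  rw [PySem.List.foldl_append_eq_flatMap]

-- one loop iteration preserves the simulation
lemma pv_step_sim (vtr : List String) (v : String) (adj : PySem.Dict String (List String))
    (pred : PySem.Dict String (PySem.Dict String Unit)) (ne : List (String × String))
    (h : pvInv adj pred) :
    (pvStepB (PySem.Set.ofList vtr) (adj, pred, ne) v).1 = (pvStepA vtr (adj, ne) v).1 ∧
    (pvStepB (PySem.Set.ofList vtr) (adj, pred, ne) v).2.2 = (pvStepA vtr (adj, ne) v).2 ∧
    pvInv (pvStepA vtr (adj, ne) v).1 (pvStepB (PySem.Set.ofList vtr) (adj, pred, ne) v).2.1 := by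
  obtain ⟨hnd, hinv⟩ := h
  have hS : pvSourcesA adj v = adj.keys.filter (fun s => decide (v ∈ adj.getD s [])) :=
    pv_sourcesA_eq adj v hnd
  have hSsub : (pvSourcesA adj v).Sublist adj.keys := by rw [hS]; exact List.filter_sublist
  have hSnd : (pvSourcesA adj v).Nodup := hnd.sublist hSsub
  have hSmem : ∀ s, s ∈ pvSourcesA adj v ↔ s ∈ adj.keys ∧ v ∈ adj.getD s [] := by
    intro s; rw [hS, List.mem_filter]; simp
  have hsrcs : (pred.getD v PySem.Dict.empty).keys = pvSourcesA adj v := by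
    rw [hS]; exact hinv v
  have hgmem : ∀ (l : List String) (t : String), t ≠ v →
      ((t ∈ (PySem.List.remove? l v).getD l) ↔ t ∈ l) := by
    intro l t ht
    by_cases hv' : v ∈ l
    · rw [PySem.List.remove?_eq_some_erase l v hv']
      simpa using List.mem_erase_of_ne ht
    · rw [(PySem.List.remove?_eq_none_iff l v).mpr hv']
      simp
  have hgv : ∀ l : List String, ((v ∈ (PySem.List.remove? l v).getD l) ↔ v ∈ l.erase v) := by
    intro l
    by_cases hv' : v ∈ l
    · rw [PySem.List.remove?_eq_some_erase l v hv']; simp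
    · rw [(PySem.List.remove?_eq_none_iff l v).mpr hv']
      simp only [Option.getD_none]
      rw [List.erase_of_not_mem hv']
  have hpair := pv_pair_fold v adj (pvSourcesA adj v) adj pred hSnd (fun s _ => rfl)
  have hne := pv_ne_eq vtr (pvSourcesA adj v) (adj.getD v []) ne
  -- names for the two intermediate states
  have hA1getD : ∀ x, ((pvSourcesA adj v).foldl
        (fun a s => a.modify s [] (fun l => (PySem.List.remove? l v).getD l)) adj).getD x [] =
      if x ∈ pvSourcesA adj v
        then (PySem.List.remove? (adj.getD x []) v).getD (adj.getD x [])
        else adj.getD x [] :=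
    fun x => pv_modfold_getD _ _ _ x hSnd
  have hA1keys : ((pvSourcesA adj v).foldl
        (fun a s => a.modify s [] (fun l => (PySem.List.remove? l v).getD l)) adj).keys =
      adj.keys :=
    pv_modfold_keys _ _ _ (fun s hs => ((hSmem s).mp hs).1)
  have hAval : pvStepA vtr (adj, ne) v =
      (if ((pvSourcesA adj v).foldl
            (fun a s => a.modify s [] (fun l => (PySem.List.remove? l v).getD l)) adj).contains v
        then ((pvSourcesA adj v).foldl
            (fun a s => a.modify s [] (fun l => (PySem.List.remove? l v).getD l)) adj).erase v
        else (pvSourcesA adj v).foldl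
            (fun a s => a.modify s [] (fun l => (PySem.List.remove? l v).getD l)) adj,
       (pvSourcesA adj v).foldl (fun acc s =>
         (adj.getD v []).foldl (fun acc t => if t ∈ vtr then acc else acc ++ [(s, t)]) acc) ne) := rfl
  have hBval : pvStepB (PySem.Set.ofList vtr) (adj, pred, ne) v =
      (if ((pvSourcesA adj v).foldl
            (fun a s => a.modify s [] (fun l => (PySem.List.remove? l v).getD l)) adj).contains v
        then (((pvSourcesA adj v).foldl
              (fun a s => a.modify s [] (fun l => (PySem.List.remove? l v).getD l)) adj).erase v,
          (((pvSourcesA adj v).foldl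
              (fun a s => a.modify s [] (fun l => (PySem.List.remove? l v).getD l)) adj).getD v
              []).foldl (fun pr t => pr.modify t PySem.Dict.empty (fun d => d.erase v))
            ((pvSourcesA adj v).foldl (fun pr s =>
              if v ∈ (PySem.List.remove? (adj.getD s []) v).getD (adj.getD s []) then pr
              else pr.modify v PySem.Dict.empty (fun d => d.erase s)) pred),
          (pvSourcesA adj v).foldl (fun acc s =>
            (adj.getD v []).foldl (fun acc t => if t ∈ vtr then acc else acc ++ [(s, t)]) acc) ne)
        else ((pvSourcesA adj v).foldl
            (fun a s => a.modify s [] (fun l => (PySem.List.remove? l v).getD l)) adj,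
          (pvSourcesA adj v).foldl (fun pr s =>
            if v ∈ (PySem.List.remove? (adj.getD s []) v).getD (adj.getD s []) then pr
            else pr.modify v PySem.Dict.empty (fun d => d.erase s)) pred,
          (pvSourcesA adj v).foldl (fun acc s =>
            (adj.getD v []).foldl (fun acc t => if t ∈ vtr then acc else acc ++ [(s, t)]) acc) ne)) := by
    simp only [pvStepB]
    rw [hsrcs, hpair, ← hne]
  have hP1 : ∀ t, ((pvSourcesA adj v).foldl (fun pr s =>
        if v ∈ (PySem.List.remove? (adj.getD s []) v).getD (adj.getD s []) then pr
        else pr.modify v PySem.Dict.empty (fun d => d.erase s)) pred).getD t PySem.Dict.empty =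
      if t = v then
        (pvSourcesA adj v).foldl (fun d s =>
          if v ∈ (PySem.List.remove? (adj.getD s []) v).getD (adj.getD s []) then d
          else d.erase s) (pred.getD v PySem.Dict.empty)
      else pred.getD t PySem.Dict.empty :=
    fun t => pv_predfold_getD v _ _ pred t
  have hP1Kv : (((pvSourcesA adj v).foldl (fun pr s =>
        if v ∈ (PySem.List.remove? (adj.getD s []) v).getD (adj.getD s []) then pr
        else pr.modify v PySem.Dict.empty (fun d => d.erase s)) pred).getD v PySem.Dict.empty).keys =
      (pvSourcesA adj v).filter (fun s => decide (v ∈ (adj.getD s []).erase v)) := by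
    rw [hP1 v, if_pos rfl, pv_erasefold_keys, hsrcs]
    apply List.filter_congr
    intro x hx
    have := hgv (adj.getD x [])
    simp [hx, this]
  have hvA1 : ∀ s, s ∈ adj.keys →
      ((v ∈ ((pvSourcesA adj v).foldl
          (fun a s => a.modify s [] (fun l => (PySem.List.remove? l v).getD l)) adj).getD s []) ↔
        v ∈ (adj.getD s []).erase v) := by
    intro s hs
    rw [hA1getD s]
    by_cases hsS : s ∈ pvSourcesA adj v
    · rw [if_pos hsS]; exact hgv _
    · rw [if_neg hsS]
      constructor
      · intro h2; exact absurd ((hSmem s).mpr ⟨hs, h2⟩) hsS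
      · intro h2; exact absurd ((hSmem s).mpr ⟨hs, List.mem_of_mem_erase h2⟩) hsS
  have hmemA1 : ∀ s t, t ≠ v →
      ((t ∈ ((pvSourcesA adj v).foldl
          (fun a s => a.modify s [] (fun l => (PySem.List.remove? l v).getD l)) adj).getD s []) ↔
        t ∈ adj.getD s []) := by
    intro s t ht
    rw [hA1getD s]
    by_cases hsS : s ∈ pvSourcesA adj v
    · rw [if_pos hsS]; exact hgmem _ t ht
    · rw [if_neg hsS]
  rw [hAval, hBval]
  by_cases hv : v ∈ adj.keys
  · have hcont : (((pvSourcesA adj v).foldl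
        (fun a s => a.modify s [] (fun l => (PySem.List.remove? l v).getD l)) adj).contains v) = true := by
      rw [PySem.Dict.contains_iff_mem_keys, hA1keys]; exact hv
    rw [if_pos hcont, if_pos hcont]
    refine ⟨rfl, rfl, ?_, ?_⟩
    · dsimp only
      rw [pv_keys_erase, hA1keys]
      exact hnd.filter _
    · intro t
      dsimp only
      unfold pvPredK
      rw [pv_delfold_keys, pv_keys_erase, hA1keys]
      by_cases ht : t = v
      · subst ht
        by_cases htv : t ∈ ((pvSourcesA adj t).foldl
            (fun a s => a.modify s [] (fun l => (PySem.List.remove? l t).getD l)) adj).getD t []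
        · rw [if_pos htv, hP1Kv]
          conv_lhs => rw [hS]
          simp only [List.filter_filter]
          apply List.filter_congr
          intro s hs
          by_cases hsv : s = t
          · subst hsv; simp
          · rw [pv_getD_erase]
            simp only [if_neg hsv]
            have h2 := hvA1 s hs
            by_cases hce : t ∈ (adj.getD s []).erase t
            · simp [h2, hce, List.mem_of_mem_erase hce]
            · simp [h2, hce]
        · rw [if_neg htv, hP1Kv]
          conv_lhs => rw [hS]
          simp only [List.filter_filter]
          apply List.filter_congr
          intro s hs
          by_cases hsv : s = t
          · subst hsv
            have hcE : ¬ (s ∈ (adj.getD s []).erase s) := fun hh => htv ((hvA1 s hs).mpr hh)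
            simp [hcE]
          · rw [pv_getD_erase]
            simp only [if_neg hsv]
            have h2 := hvA1 s hs
            by_cases hce : t ∈ (adj.getD s []).erase t
            · simp [hsv, h2, hce, List.mem_of_mem_erase hce]
            · simp [h2, hce]
      · rw [hP1 t, if_neg ht,
          show (pred.getD t PySem.Dict.empty).keys = pvPredK pred t from rfl, hinv t]
        by_cases htts : t ∈ ((pvSourcesA adj v).foldl
            (fun a s => a.modify s [] (fun l => (PySem.List.remove? l v).getD l)) adj).getD v []
        · rw [if_pos htts]
          simp only [List.filter_filter]
          apply List.filter_congr
          intro s hs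
          by_cases hsv : s = v
          · subst hsv; simp
          · rw [pv_getD_erase]
            simp only [if_neg hsv]
            have h2 := hmemA1 s t ht
            by_cases hts2 : t ∈ adj.getD s [] <;> simp [h2, hts2]
        · rw [if_neg htts]
          simp only [List.filter_filter]
          apply List.filter_congr
          intro s hs
          by_cases hsv : s = v
          · subst hsv
            have hf : ¬ t ∈ adj.getD s [] := fun hh => htts ((hmemA1 s t ht).mpr hh)
            simp [hf]
          · rw [pv_getD_erase]
            simp only [if_neg hsv]
            have h2 := hmemA1 s t ht
            by_cases hts2 : t ∈ adj.getD s [] <;> simp [hsv, h2, hts2]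
  · have hcont : (((pvSourcesA adj v).foldl
        (fun a s => a.modify s [] (fun l => (PySem.List.remove? l v).getD l)) adj).contains v) = false := by
      rw [Bool.eq_false_iff, Ne, PySem.Dict.contains_iff_mem_keys, hA1keys]; exact hv
    rw [if_neg (by simp [hcont]), if_neg (by simp [hcont])]
    refine ⟨rfl, rfl, ?_, ?_⟩
    · dsimp only
      rw [hA1keys]; exact hnd
    · intro t
      dsimp only
      unfold pvPredK
      by_cases ht : t = v
      · subst ht
        rw [hP1Kv, hA1keys]
        conv_lhs => rw [hS]
        simp only [List.filter_filter]
        apply List.filter_congr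
        intro s hs
        have h2 := hvA1 s hs
        by_cases hce : t ∈ (adj.getD s []).erase t
        · simp [h2, hce, List.mem_of_mem_erase hce]
        · simp [h2, hce]
      · rw [hP1 t, if_neg ht,
          show (pred.getD t PySem.Dict.empty).keys = pvPredK pred t from rfl, hinv t, hA1keys]
        apply List.filter_congr
        intro s hs
        have h2 := hmemA1 s t ht
        by_cases hts2 : t ∈ adj.getD s [] <;> simp [h2, hts2]

-- the whole loop
lemma pv_loop (vtr rest : List String) (adj : PySem.Dict String (List String))
    (pred : PySem.Dict String (PySem.Dict String Unit)) (ne : List (String × String))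
    (h : pvInv adj pred) :
    (rest.foldl (pvStepB (PySem.Set.ofList vtr)) (adj, pred, ne)).2.2 =
      (rest.foldl (pvStepA vtr) (adj, ne)).2 := by
  revert h
  induction rest generalizing adj pred ne with
  | nil => intro _; rfl
  | cons v rest ih =>
    intro h
    obtain ⟨h1, h2, h3⟩ := pv_step_sim vtr v adj pred ne h
    simp only [List.foldl_cons]
    rcases hB : pvStepB (PySem.Set.ofList vtr) (adj, pred, ne) v with ⟨a, p, n⟩
    rcases hA : pvStepA vtr (adj, ne) v with ⟨a2, n2⟩
    rw [hB, hA] at h1 h2 h3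
    dsimp only at h1 h2 h3
    subst h1 h2
    exact ih a p n h3

-- ===== VERDICT (by name: the statement is the Claim_ definition above) =====
theorem remove_vertices_and_bypass_spec : Claim_equal_remove_vertices_and_bypass := by
  intro edges vtr _
  unfold Spec_remove_vertices_and_bypass
  show (edges.filter (fun p => decide (p.1 ∉ vtr) && decide (p.2 ∉ vtr))) ++
      (vtr.foldl (pvStepA vtr) (pvGroup edges, [])).2 =
    (edges.filter (fun p =>
        !((PySem.Set.ofList vtr).contains p.1) && !((PySem.Set.ofList vtr).contains p.2))) ++
      (vtr.foldl (pvStepB (PySem.Set.ofList vtr))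
        (pvGroup edges,
         (pvGroup edges).items.foldl (fun pr q =>
           q.2.foldl (fun pr t => pr.modify t PySem.Dict.empty (fun d => d.insert q.1 ())) pr)
           PySem.Dict.empty, [])).2.2
  rw [pv_loop vtr vtr (pvGroup edges) _ [] (pv_inv_init edges)]
  congr 1
  apply List.filter_congr
  intro p _
  rw [pv_contains_ofList, pv_contains_ofList]
  by_cases h1 : p.1 ∈ vtr <;> by_cases h2 : p.2 ∈ vtr <;> simp [h1, h2]
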